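-- pv_equiv track=rewrite | github.com/yunsseong/algorithm | Programmers/87946.py | solution
-- ===== SOURCE A (Python) =====
-- from itertools import permutations
--
-- def solution(k, dungeons):
--     maxn = 0
--     cases = list(permutations(dungeons))
--     for case in cases:
--         cur = k
--         cnt = 0
--         for dungeon in case:
--             if cur >= dungeon[0]:
--                 cur -= dungeon[1]
--                 cnt += 1
--         maxn = max(maxn, cnt)
--     return maxn
-- ===== SOURCE B (Python) =====
-- def solution(k, dungeons):
--     # Recursive backtracking: try each still-available affordable dungeon next,
--     # instead of materialising every permutation.
--     def best(cur, ds):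
--         m = 0
--         for i in range(len(ds)):
--             d = ds[i]
--             if cur >= d[0]:
--                 r = 1 + best(cur - d[1], ds[:i] + ds[i + 1:])
--                 if r > m:
--                     m = r
--         return m
--     return best(k, dungeons)
-- ===== Notes on version B (the rewrite author's own statement) =====
-- stated objective: alternative
-- what changed: B replaces A's materialisation and exhaustive scan of all n! permutations by recursive backtracking that, at each step, tries only the still-available dungeons and recurses only on the affordable ones.
-- outside the precondition, e.g. on solution(0, [[5]]): A returns 0, B returns 0
import Mathlib
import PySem

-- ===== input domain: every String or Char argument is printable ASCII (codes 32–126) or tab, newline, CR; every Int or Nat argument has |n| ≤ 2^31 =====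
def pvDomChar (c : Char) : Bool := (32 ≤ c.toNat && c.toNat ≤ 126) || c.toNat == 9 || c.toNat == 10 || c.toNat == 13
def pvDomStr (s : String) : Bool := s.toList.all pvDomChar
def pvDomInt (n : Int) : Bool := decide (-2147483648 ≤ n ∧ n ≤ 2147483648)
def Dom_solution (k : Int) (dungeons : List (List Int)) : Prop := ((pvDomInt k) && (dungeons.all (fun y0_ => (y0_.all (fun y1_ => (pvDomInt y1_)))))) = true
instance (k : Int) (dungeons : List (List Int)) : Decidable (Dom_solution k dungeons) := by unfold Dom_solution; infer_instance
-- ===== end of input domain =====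

-- B replaces A's exhaustive scan of all n! materialised permutations by recursive
-- backtracking over the still-available dungeons, recursing only on affordable ones
-- (objective: alternative; it allocates no permutation list and prunes, but the
-- worst case is still factorial).

-- ===== PORT A =====
-- Literal port of A: build the list of all permutations, then for each one run
-- through it with (cur, cnt), clearing a dungeon whenever cur >= dungeon[0].
-- dungeon[0] / dungeon[1] are ported as getD (exact under Pre_: length ≥ 2).
def solution (k : Int) (dungeons : List (List Int)) : Int :=
  let cases := dungeons.permutations
  cases.foldl
    (fun maxn case =>
      let r := case.foldl
        (fun (s : Int × Int) dungeon =>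
          if s.1 ≥ dungeon.getD 0 0 then (s.1 - dungeon.getD 1 0, s.2 + 1) else s)
        (k, 0)
      max maxn r.2)
    0

-- ===== PORT B =====
-- Literal port of Source B's `best(cur, ds)`: loop i over range(len(ds)); if ds[i] is
-- affordable, recurse on ds with index i removed (ds[:i] + ds[i+1:] = eraseIdx i).
-- The fuel argument (= length of ds, enough since each call removes one element)
-- only makes the recursion total; it never cuts the computation short.
def bestB : Nat → Int → List (List Int) → Int
  | 0, _, _ => 0
  | fuel + 1, cur, ds =>
    (List.range ds.length).foldl
      (fun m i =>
        let d := ds.getD i []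
        if cur ≥ d.getD 0 0 then
          let r := 1 + bestB fuel (cur - d.getD 1 0) (ds.eraseIdx i)
          if m < r then r else m
        else m)
      0

def solution_alt (k : Int) (dungeons : List (List Int)) : Int :=
  bestB dungeons.length k dungeons

-- ===== PRECONDITION & SPEC =====
-- Pre_ requires every dungeon to be a [required, cost] pair (length ≥ 2): on shorter
-- entries Python A raises IndexError whenever it reads dungeon[0]/dungeon[1], i.e. on
-- every input containing an empty entry and on those with a length-1 entry that ever
-- becomes affordable; the remaining excluded inputs (a never-affordable length-1
-- entry) are ill-shaped for the task and both programs return the same value there.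
def Pre_solution (k : Int) (dungeons : List (List Int)) : Prop :=
  ∀ d ∈ dungeons, 2 ≤ d.length
instance (k : Int) (dungeons : List (List Int)) : Decidable (Pre_solution k dungeons) := by
  unfold Pre_solution; infer_instance

def pvWitness_solution : Int × List (List Int) := (80, [[80, 20], [50, 40], [30, 10]])

def Spec_solution (k : Int) (dungeons : List (List Int)) (out : Int) : Prop := out = solution_alt k dungeons
instance (k : Int) (dungeons : List (List Int)) (out : Int) : Decidable (Spec_solution k dungeons out) := by unfold Spec_solution; infer_instance

-- ===== CLAIM (what is proved, stated in full; the proofs are below) =====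
def Claim_equal_solution : Prop := ∀ (k : Int) (dungeons : List (List Int)), Dom_solution k dungeons → Pre_solution k dungeons → Spec_solution k dungeons (solution k dungeons)

-- ===== LEMMAS AND PROOFS =====

-- A's inner loop body, and the count it produces from a fresh (cur, 0) state.
def stepA (s : Int × Int) (dungeon : List Int) : Int × Int :=
  if s.1 ≥ dungeon.getD 0 0 then (s.1 - dungeon.getD 1 0, s.2 + 1) else s

def cntA (cur : Int) (l : List (List Int)) : Int := (l.foldl stepA (cur, 0)).2

theorem solution_eq_fold (k : Int) (ds : List (List Int)) :
    solution k ds = ds.permutations.foldl (fun m c => max m (cntA k c)) 0 := rfl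

-- B's loop body / candidate value / guard, so the generic fold lemmas apply.
def xB (fuel : Nat) (cur : Int) (ds : List (List Int)) (i : Nat) : Int :=
  1 + bestB fuel (cur - (ds.getD i []).getD 1 0) (ds.eraseIdx i)

def PB (cur : Int) (ds : List (List Int)) (i : Nat) : Prop :=
  cur ≥ (ds.getD i []).getD 0 0

def gB (fuel : Nat) (cur : Int) (ds : List (List Int)) : Int → Nat → Int :=
  fun m i =>
    let d := ds.getD i []
    if cur ≥ d.getD 0 0 then
      let r := 1 + bestB fuel (cur - d.getD 1 0) (ds.eraseIdx i)
      if m < r then r else m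
    else m

theorem bestB_succ (fuel : Nat) (cur : Int) (ds : List (List Int)) :
    bestB (fuel + 1) cur ds = (List.range ds.length).foldl (gB fuel cur ds) 0 := rfl

-- Generic facts about max-accumulating folds.
theorem fold_ge_init {β : Type} (g : Int → β → Int) (h1 : ∀ a b, a ≤ g a b) :
    ∀ (L : List β) (m : Int), m ≤ L.foldl g m := by
  intro L
  induction L with
  | nil => intro m; simp
  | cons b L ih => intro m; exact le_trans (h1 m b) (ih (g m b))

theorem fold_ge_elem {β : Type} (g : Int → β → Int) (x : β → Int) (P : β → Prop)
    (h1 : ∀ a b, a ≤ g a b) (h3 : ∀ a b, P b → x b ≤ g a b) :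
    ∀ (L : List β) (m : Int) (b : β), b ∈ L → P b → x b ≤ L.foldl g m := by
  intro L
  induction L with
  | nil => intro m b hb; exact absurd hb (List.not_mem_nil)
  | cons c L ih =>
    intro m b hb hP
    rcases List.mem_cons.mp hb with h | h
    · subst h; exact le_trans (h3 m b hP) (fold_ge_init g h1 L (g m b))
    · exact ih (g m c) b h hP

theorem fold_cases {β : Type} (g : Int → β → Int) (x : β → Int) (P : β → Prop)
    (h2 : ∀ a b, g a b = a ∨ (P b ∧ g a b = x b)) :
    ∀ (L : List β) (m : Int), L.foldl g m = m ∨ ∃ b ∈ L, P b ∧ L.foldl g m = x b := by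
  intro L
  induction L with
  | nil => intro m; exact Or.inl rfl
  | cons c L ih =>
    intro m
    rcases ih (g m c) with h | ⟨b, hb, hP, he⟩
    · rcases h2 m c with hc | ⟨hPc, hc⟩
      · exact hc ▸ Or.inl (by simpa [hc] using h)
      · exact Or.inr ⟨c, List.mem_cons_self, hPc, by simpa [hc] using h⟩
    · exact Or.inr ⟨b, List.mem_cons_of_mem _ hb, hP, he⟩

theorem gB_h1 (fuel : Nat) (cur : Int) (ds : List (List Int)) :
    ∀ (a : Int) (i : Nat), a ≤ gB fuel cur ds a i := by
  intro a i; simp only [gB]; split_ifs <;> omega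

theorem gB_h3 (fuel : Nat) (cur : Int) (ds : List (List Int)) :
    ∀ (a : Int) (i : Nat), PB cur ds i → xB fuel cur ds i ≤ gB fuel cur ds a i := by
  intro a i hP
  simp only [PB, ge_iff_le] at hP
  simp only [gB, xB]
  split_ifs with h1 h2 <;> omega

theorem gB_h2 (fuel : Nat) (cur : Int) (ds : List (List Int)) :
    ∀ (a : Int) (i : Nat),
      gB fuel cur ds a i = a ∨ (PB cur ds i ∧ gB fuel cur ds a i = xB fuel cur ds i) := by
  intro a i
  simp only [gB]
  split_ifs with h1 h2
  · exact Or.inr ⟨h1, rfl⟩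
  · exact Or.inl rfl
  · exact Or.inl rfl

theorem bestB_nonneg : ∀ (fuel : Nat) (cur : Int) (ds : List (List Int)), 0 ≤ bestB fuel cur ds := by
  intro fuel cur ds
  cases fuel with
  | zero => simp [bestB]
  | succ n =>
    rw [bestB_succ]
    exact fold_ge_init (gB n cur ds) (gB_h1 n cur ds) _ 0

theorem foldA_shift : ∀ (l : List (List Int)) (cur c : Int),
    l.foldl stepA (cur, c) = ((l.foldl stepA (cur, 0)).1, c + (l.foldl stepA (cur, 0)).2) := by
  intro l
  induction l with
  | nil => intro cur c; simp
  | cons d l ih =>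
    intro cur c
    simp only [List.foldl_cons, stepA]
    by_cases h : cur ≥ d.getD 0 0
    · simp only [if_pos h]
      rw [ih (cur - d.getD 1 0) (c + 1), ih (cur - d.getD 1 0) (0 + 1)]
      simp only [Prod.mk.injEq]
      exact ⟨trivial, by omega⟩
    · simp only [if_neg h]
      exact ih cur c

theorem cntA_cons (cur : Int) (d : List Int) (l : List (List Int)) :
    cntA cur (d :: l) =
      if cur ≥ d.getD 0 0 then 1 + cntA (cur - d.getD 1 0) l else cntA cur l := by
  simp only [cntA, List.foldl_cons, stepA]
  split_ifs with h
  · rw [foldA_shift l (cur - d.getD 1 0) (0 + 1)]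
    omega
  · rfl

theorem cntA_nonneg : ∀ (l : List (List Int)) (cur : Int), 0 ≤ cntA cur l := by
  intro l
  induction l with
  | nil => intro cur; simp [cntA]
  | cons d l ih =>
    intro cur
    rw [cntA_cons]
    split_ifs with h
    · have := ih (cur - d.getD 1 0); omega
    · exact ih cur

-- KEY monotonicity: bestB on a sub-multiset (any fuel) is at most bestB on the
-- full multiset (with enough fuel).
theorem bestB_mono : ∀ (n m : Nat) (cur : Int) (s t : List (List Int)),
    List.Subperm s t → t.length ≤ m → bestB n cur s ≤ bestB m cur t := by
  intro n
  induction n with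
  | zero => intro m cur s t _ _; simpa [bestB] using bestB_nonneg m cur t
  | succ n ih =>
    intro m cur s t hsub hlen
    rcases fold_cases _ (xB n cur s) (PB cur s) (gB_h2 n cur s) (List.range s.length) 0 with h0 | ⟨i, hi, hP, hval⟩
    · rw [bestB_succ, h0]; exact bestB_nonneg m cur t
    · have hilt : i < s.length := List.mem_range.mp hi
      have hsd : s.getD i [] = s[i] := List.getD_eq_getElem s [] hilt
      have hmem : s[i] ∈ t := hsub.subset (List.getElem_mem hilt)
      rcases List.mem_iff_getElem.mp hmem with ⟨j, hjlt, hj⟩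
      obtain ⟨m', rfl⟩ : ∃ m', m = m' + 1 := ⟨m - 1, by omega⟩
      have htd : t.getD j [] = s[i] := by rw [List.getD_eq_getElem t [] hjlt, hj]
      -- the right-hand side admits choosing index j first
      have hrhs : xB m' cur t j ≤ bestB (m' + 1) cur t := by
        rw [bestB_succ]
        exact fold_ge_elem _ (xB m' cur t) (PB cur t) (gB_h1 m' cur t) (gB_h3 m' cur t)
          (List.range t.length) 0 j (List.mem_range.mpr hjlt)
          (by simpa only [PB, htd, hsd] using hP)
      -- recursive comparison on the two erased lists
      have hsub' : List.Subperm (s.eraseIdx i) (t.eraseIdx j) := by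
        have h1 : List.Subperm (s.eraseIdx i) (s.erase s[i]) := ((List.erase_getElem hilt).symm).subperm
        have h2 : List.Subperm (s.erase s[i]) (t.erase s[i]) := hsub.erase s[i]
        have h3 : List.Subperm (t.erase s[i]) (t.eraseIdx j) := (hj ▸ (List.erase_getElem hjlt)).subperm
        exact (h1.trans h2).trans h3
      have hlen' : (t.eraseIdx j).length ≤ m' := by
        rw [List.length_eraseIdx_of_lt hjlt]; omega
      have hrec := ih m' (cur - (s.getD i []).getD 1 0) (s.eraseIdx i) (t.eraseIdx j) hsub' hlen'
      rw [bestB_succ, hval]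
      calc xB n cur s i = 1 + bestB n (cur - (s.getD i []).getD 1 0) (s.eraseIdx i) := rfl
        _ ≤ 1 + bestB m' (cur - (s.getD i []).getD 1 0) (t.eraseIdx j) := by omega
        _ = xB m' cur t j := by simp only [xB, htd, hsd]
        _ ≤ bestB (m' + 1) cur t := hrhs

-- A ≤ B: the count of any permutation is at most bestB.
theorem cntA_le_bestB : ∀ (p : List (List Int)) (n : Nat) (cur : Int) (ds : List (List Int)),
    List.Perm p ds → ds.length ≤ n → cntA cur p ≤ bestB n cur ds := by
  intro p
  induction p with
  | nil => intro n cur ds _ _; simpa [cntA] using bestB_nonneg n cur ds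
  | cons d p' ih =>
    intro n cur ds hp hlen
    have hd : d ∈ ds := hp.subset List.mem_cons_self
    rcases List.mem_iff_getElem.mp hd with ⟨i, hilt, hi⟩
    have hperm2 : List.Perm p' (ds.eraseIdx i) := by
      have h1 : List.Perm (ds[i] :: ds.eraseIdx i) ds := List.getElem_cons_eraseIdx_perm hilt
      have h2 : List.Perm (d :: p') (d :: ds.eraseIdx i) := hp.trans (hi ▸ h1.symm)
      exact h2.cons_inv
    obtain ⟨n', rfl⟩ : ∃ n', n = n' + 1 := ⟨n - 1, by omega⟩
    have hlen' : (ds.eraseIdx i).length ≤ n' := by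
      rw [List.length_eraseIdx_of_lt hilt]; omega
    have ihle := ih n' (cur - d.getD 1 0) (ds.eraseIdx i) hperm2 hlen'
    have hsd : ds.getD i [] = d := by rw [List.getD_eq_getElem ds [] hilt, hi]
    rw [cntA_cons]
    split_ifs with h
    · have hrhs : xB n' cur ds i ≤ bestB (n' + 1) cur ds := by
        rw [bestB_succ]
        exact fold_ge_elem _ (xB n' cur ds) (PB cur ds) (gB_h1 n' cur ds) (gB_h3 n' cur ds)
          (List.range ds.length) 0 i (List.mem_range.mpr hilt)
          (by simpa only [PB, hsd] using h)
      calc 1 + cntA (cur - d.getD 1 0) p' ≤ 1 + bestB n' (cur - d.getD 1 0) (ds.eraseIdx i) := by omega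
        _ = xB n' cur ds i := by simp only [xB, hsd]
        _ ≤ bestB (n' + 1) cur ds := hrhs
    · have ihle2 := ih n' cur (ds.eraseIdx i) hperm2 hlen'
      have hsub : List.Subperm (ds.eraseIdx i) ds := by
        have h1 : List.Subperm (ds.eraseIdx i) (ds.erase ds[i]) := ((List.erase_getElem hilt).symm).subperm
        exact h1.trans (List.erase_subperm ds[i] ds)
      exact le_trans ihle2 (le_trans (bestB_mono n' n' cur (ds.eraseIdx i) (ds.eraseIdx i) (List.Subperm.refl _) (le_of_eq rfl |>.trans hlen')) (bestB_mono n' (n' + 1) cur (ds.eraseIdx i) ds hsub hlen))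

-- B ≤ A: bestB is realised by the count of some permutation.
theorem bestB_realised : ∀ (n : Nat) (cur : Int) (ds : List (List Int)),
    ∃ p, List.Perm p ds ∧ bestB n cur ds ≤ cntA cur p := by
  intro n
  induction n with
  | zero => intro cur ds; exact ⟨ds, List.Perm.refl ds, by simpa [bestB] using cntA_nonneg ds cur⟩
  | succ n ih =>
    intro cur ds
    rcases fold_cases _ (xB n cur ds) (PB cur ds) (gB_h2 n cur ds) (List.range ds.length) 0 with h0 | ⟨i, hi, hP, hval⟩
    · exact ⟨ds, List.Perm.refl ds, by rw [bestB_succ, h0]; exact cntA_nonneg ds cur⟩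
    · have hilt : i < ds.length := List.mem_range.mp hi
      have hsd : ds.getD i [] = ds[i] := List.getD_eq_getElem ds [] hilt
      rcases ih (cur - (ds.getD i []).getD 1 0) (ds.eraseIdx i) with ⟨q, hq, hle⟩
      refine ⟨ds.getD i [] :: q, ?_, ?_⟩
      · have h1 : List.Perm (ds[i] :: ds.eraseIdx i) ds := List.getElem_cons_eraseIdx_perm hilt
        exact hsd ▸ ((hq.cons ds[i]).trans h1)
      · have hP' : cur ≥ (ds.getD i []).getD 0 0 := hP
        rw [cntA_cons, if_pos hP']
        rw [bestB_succ, hval]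
        simp only [xB]
        omega

theorem solution_eq_bestB (k : Int) (ds : List (List Int)) :
    solution k ds = bestB ds.length k ds := by
  apply le_antisymm
  · rw [solution_eq_fold]
    rcases fold_cases (fun m c => max m (cntA k c)) (cntA k) (fun _ => True)
      (by intro a b; rcases le_total a (cntA k b) with h | h
          · exact Or.inr ⟨trivial, max_eq_right h⟩
          · exact Or.inl (max_eq_left h)) ds.permutations 0 with h0 | ⟨c, hc, _, hval⟩
    · rw [h0]; exact bestB_nonneg ds.length k ds
    · rw [hval]
      exact cntA_le_bestB c ds.length k ds (List.mem_permutations.mp hc) le_rfl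
  · rcases bestB_realised ds.length k ds with ⟨p, hp, hle⟩
    refine le_trans hle ?_
    rw [solution_eq_fold]
    exact fold_ge_elem (fun m c => max m (cntA k c)) (cntA k) (fun _ => True)
      (fun a b => le_max_left a (cntA k b)) (fun a b _ => le_max_right a (cntA k b))
      ds.permutations 0 p (List.mem_permutations.mpr hp) trivial

-- ===== VERDICT (by name: the statement is the Claim_ definition above) =====
theorem solution_spec : Claim_equal_solution := by
  intro k dungeons _ _
  unfold Spec_solution solution_alt
  exact solution_eq_bestB k dungeons
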